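-- pv_equiv track=rewrite | github.com/mattyg3/pyboy-agents | src/pokemon_agent/map_render_from_rom.py | generate_walkability_tile_matrix
-- ===== SOURCE A (Python) =====
-- def generate_walkability_tile_matrix(blocks, map_blocks, walkable_tiles):
--     """
--     Returns a 2D list of booleans at the TILE level.
--     True = walkable, False = unwalkable.
--     Each block = 4×4 tiles.
--     """
--     tiles_per_block = 4
--     height_blocks = len(map_blocks)
--     width_blocks = len(map_blocks[0])
--
--     height_tiles = height_blocks * tiles_per_block
--     width_tiles = width_blocks * tiles_per_block
--
--     walk_matrix = [[False for _ in range(width_tiles)] for _ in range(height_tiles)]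
--
--     for by in range(height_blocks):
--         for bx in range(width_blocks):
--             block_idx = map_blocks[by][bx]
--             if block_idx >= len(blocks):
--                 continue
--
--             block = blocks[block_idx]
--             for ty in range(tiles_per_block):
--                 for tx in range(tiles_per_block):
--                     tile_id = block[ty][tx]
--                     global_y = by * tiles_per_block + ty
--                     global_x = bx * tiles_per_block + tx
--                     walk_matrix[global_y][global_x] = tile_id in walkable_tiles
--
--     return walk_matrix
-- ===== SOURCE B (Python) =====
-- def generate_walkability_tile_matrix(blocks, map_blocks, walkable_tiles):
--     """
--     Returns a 2D list of booleans at the TILE level.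
--     True = walkable, False = unwalkable.
--     Each block = 4x4 tiles.
--     """
--     T = 4
--     height_tiles = len(map_blocks) * T
--     width_tiles = len(map_blocks[0]) * T
--     walkable = set(walkable_tiles)
--
--     def cell(gy, gx):
--         by, ty = divmod(gy, T)
--         bx, tx = divmod(gx, T)
--         idx = map_blocks[by][bx]
--         return idx < len(blocks) and blocks[idx][ty][tx] in walkable
--
--     return [[cell(gy, gx) for gx in range(width_tiles)]
--             for gy in range(height_tiles)]
-- ===== Notes on version B (the rewrite author's own statement) =====
-- stated objective: simpler
-- what changed: B builds the matrix output-driven: a nested comprehension over every tile coordinate computes its own cell via divmod, replacing A's preallocated False matrix mutated by four nested scatter-write loops over blocks.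
import Mathlib
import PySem

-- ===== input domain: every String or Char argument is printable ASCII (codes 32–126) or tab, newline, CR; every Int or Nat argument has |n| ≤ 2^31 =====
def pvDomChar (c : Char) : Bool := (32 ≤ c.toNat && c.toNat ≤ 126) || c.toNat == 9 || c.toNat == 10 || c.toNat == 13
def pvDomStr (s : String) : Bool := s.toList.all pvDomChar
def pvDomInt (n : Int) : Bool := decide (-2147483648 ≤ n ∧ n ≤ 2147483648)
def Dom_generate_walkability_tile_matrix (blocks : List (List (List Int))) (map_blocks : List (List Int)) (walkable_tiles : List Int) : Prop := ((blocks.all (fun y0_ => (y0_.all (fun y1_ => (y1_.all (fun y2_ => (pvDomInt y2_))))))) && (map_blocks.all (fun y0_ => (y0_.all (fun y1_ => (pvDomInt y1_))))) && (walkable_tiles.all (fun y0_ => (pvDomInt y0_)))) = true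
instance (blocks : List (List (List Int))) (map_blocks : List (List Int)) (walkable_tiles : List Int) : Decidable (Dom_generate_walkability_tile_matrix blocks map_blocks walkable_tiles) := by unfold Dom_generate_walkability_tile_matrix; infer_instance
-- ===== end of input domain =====

-- B replaces A's scatter-writing nested block loops by an output-driven nested comprehension
-- (each tile cell computed directly via divmod); objective: simpler, same asymptotic cost.

-- ===== PORT A =====
-- Literal port of A; where Python raises IndexError the getD/pyGet? defaults fire,
-- and exactly those inputs are excluded by Pre_ below.
def generate_walkability_tile_matrix (blocks : List (List (List Int))) (map_blocks : List (List Int)) (walkable_tiles : List Int) : List (List Bool) :=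
  let tiles_per_block : Nat := 4
  let height_blocks := map_blocks.length
  let width_blocks := (map_blocks.headD []).length
  let height_tiles := height_blocks * tiles_per_block
  let width_tiles := width_blocks * tiles_per_block
  let walk_matrix := List.replicate height_tiles (List.replicate width_tiles false)
  (List.range height_blocks).foldl (fun m by_ =>
    (List.range width_blocks).foldl (fun m bx =>
      let block_idx := (map_blocks.getD by_ []).getD bx 0
      if (blocks.length : Int) ≤ block_idx then m
      else
        let block := (PySem.List.pyGet? blocks block_idx).getD []
        (List.range tiles_per_block).foldl (fun m ty =>
          (List.range tiles_per_block).foldl (fun m tx =>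
            let tile_id := (block.getD ty []).getD tx 0
            m.modify (by_ * tiles_per_block + ty)
              (fun row => row.set (bx * tiles_per_block + tx) (walkable_tiles.contains tile_id))) m) m) m)
    walk_matrix


-- ===== PORT B =====
def generate_walkability_tile_matrix_alt (blocks : List (List (List Int))) (map_blocks : List (List Int)) (walkable_tiles : List Int) : List (List Bool) :=
  let t : Nat := 4
  let height_tiles := map_blocks.length * t
  let width_tiles := (map_blocks.headD []).length * t
  let walkable := PySem.Set.ofList walkable_tiles
  (List.range height_tiles).map (fun gy =>
    (List.range width_tiles).map (fun gx =>
      let idx := (map_blocks.getD (gy / t) []).getD (gx / t) 0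
      if idx < (blocks.length : Int) then
        walkable.contains ((((PySem.List.pyGet? blocks idx).getD []).getD (gy % t) []).getD (gx % t) 0)
      else false))

-- ===== PRECONDITION & SPEC =====
-- pvBlockOk blocks idx: if idx passes A's 'block_idx >= len(blocks)' skip test, then
-- blocks[idx] must exist (negative wraparound included) and have at least 4 rows of at least 4 tiles.
def pvBlockOk (blocks : List (List (List Int))) (idx : Int) : Bool :=
  if idx < (blocks.length : Int) then
    match PySem.List.pyGet? blocks idx with
    | none => false
    | some b => decide (4 ≤ b.length) && (b.take 4).all (fun r => decide (4 ≤ r.length))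
  else true

-- Pre_ excludes exactly the inputs where Python A raises IndexError: empty map_blocks
-- (map_blocks[0]), a row shorter than the first row, a referenced index below -len(blocks),
-- or a referenced block lacking 4 rows of 4 tiles.
def Pre_generate_walkability_tile_matrix (blocks : List (List (List Int))) (map_blocks : List (List Int)) (walkable_tiles : List Int) : Prop :=
  map_blocks ≠ [] ∧
  ∀ row ∈ map_blocks, (map_blocks.headD []).length ≤ row.length ∧
    ∀ idx ∈ row.take (map_blocks.headD []).length, pvBlockOk blocks idx = true

instance (blocks : List (List (List Int))) (map_blocks : List (List Int)) (walkable_tiles : List Int) : Decidable (Pre_generate_walkability_tile_matrix blocks map_blocks walkable_tiles) := by unfold Pre_generate_walkability_tile_matrix; infer_instance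

def pvWitness_generate_walkability_tile_matrix : List (List (List Int)) × List (List Int) × List Int :=
  ([[[0, 1, 0, 0], [0, 0, 0, 0], [0, 0, 0, 0], [0, 0, 0, 1]]], [[0, -1], [5, 0]], [1])

def Spec_generate_walkability_tile_matrix (blocks : List (List (List Int))) (map_blocks : List (List Int)) (walkable_tiles : List Int) (out : List (List Bool)) : Prop := out = generate_walkability_tile_matrix_alt blocks map_blocks walkable_tiles
instance (blocks : List (List (List Int))) (map_blocks : List (List Int)) (walkable_tiles : List Int) (out : List (List Bool)) : Decidable (Spec_generate_walkability_tile_matrix blocks map_blocks walkable_tiles out) := by unfold Spec_generate_walkability_tile_matrix; infer_instance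

-- ===== CLAIM (what is proved, stated in full; the proofs are below) =====
def Claim_equal_generate_walkability_tile_matrix : Prop := ∀ (blocks : List (List (List Int))) (map_blocks : List (List Int)) (walkable_tiles : List Int), Dom_generate_walkability_tile_matrix blocks map_blocks walkable_tiles → Pre_generate_walkability_tile_matrix blocks map_blocks walkable_tiles → Spec_generate_walkability_tile_matrix blocks map_blocks walkable_tiles (generate_walkability_tile_matrix blocks map_blocks walkable_tiles)

-- ===== LEMMAS AND PROOFS =====
def pvM (n w : Nat) (g : Nat → Nat → Bool) : List (List Bool) :=
  (List.range n).map (fun y => (List.range w).map (g y))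

theorem pv_set_map_range (w : Nat) (h : Nat → Bool) (gx : Nat) (v : Bool) :
    ((List.range w).map h).set gx v = (List.range w).map (fun x => if x = gx then v else h x) := by
  apply List.ext_getElem?
  intro x
  simp only [List.getElem?_set, List.getElem?_map, List.length_map, List.length_range]
  by_cases hx : x < w <;> by_cases hgx : gx = x <;> simp [hx, hgx] <;> omega

theorem pvM_getElem? (n w : Nat) (g : Nat → Nat → Bool) (j : Nat) :
    (pvM n w g)[j]? = if j < n then some ((List.range w).map (g j)) else none := by
  by_cases hj : j < n <;> simp [pvM, hj]

theorem pv_write (n w : Nat) (g : Nat → Nat → Bool) (gy gx : Nat) (v : Bool) :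
    (pvM n w g).modify gy (fun row => row.set gx v)
      = pvM n w (fun y x => if y = gy ∧ x = gx then v else g y x) := by
  apply List.ext_getElem?
  intro j
  rw [List.getElem?_modify, pvM_getElem?, pvM_getElem?]
  by_cases hj : j < n
  · simp only [hj, if_pos, Option.map_some]
    by_cases hgy : gy = j
    · subst hgy
      simp [pv_set_map_range]
    · have : ∀ x, ¬(j = gy ∧ x = gx) := fun x hc => hgy hc.1.symm
      simp [hgy, this]
  · simp [hj]

theorem pv_init (n w : Nat) :
    List.replicate n (List.replicate w false) = pvM n w (fun _ _ => false) := by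
  simp [pvM, List.map_const']

theorem pvM_congr (n w : Nat) (g g' : Nat → Nat → Bool)
    (h : ∀ y, y < n → ∀ x, x < w → g y x = g' y x) : pvM n w g = pvM n w g' := by
  unfold pvM
  apply List.map_congr_left
  intro y hy
  apply List.map_congr_left
  intro x hx
  exact h y (List.mem_range.mp hy) x (List.mem_range.mp hx)

def pvTile (wt : List Int) (block : List (List Int)) (ty tx : Nat) : Bool :=
  wt.contains ((block.getD ty []).getD tx 0)

set_option maxHeartbeats 2000000 in
theorem pv_block (n w : Nat) (wt : List Int) (block : List (List Int)) (by_ bx : Nat)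
    (g : Nat → Nat → Bool) :
    (List.range 4).foldl (fun m ty =>
      (List.range 4).foldl (fun m tx =>
        m.modify (by_ * 4 + ty)
          (fun row => row.set (bx * 4 + tx) (wt.contains ((block.getD ty []).getD tx 0)))) m)
      (pvM n w g)
    = pvM n w (fun y x =>
        if y / 4 = by_ ∧ x / 4 = bx then pvTile wt block (y % 4) (x % 4) else g y x) := by
  have h4 : List.range 4 = [0, 1, 2, 3] := by decide
  rw [h4]
  simp only [List.foldl_cons, List.foldl_nil, pv_write]
  apply pvM_congr
  intro y _ x _
  by_cases hy : y / 4 = by_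
  · by_cases hx : x / 4 = bx
    · conv_rhs => rw [if_pos ⟨hy, hx⟩]
      have hm : y % 4 = 0 ∨ y % 4 = 1 ∨ y % 4 = 2 ∨ y % 4 = 3 := by omega
      have hmx : x % 4 = 0 ∨ x % 4 = 1 ∨ x % 4 = 2 ∨ x % 4 = 3 := by omega
      rcases hm with hm | hm | hm | hm <;> rcases hmx with hmx | hmx | hmx | hmx
      · rw [hm, hmx]
        rw [if_neg (show ¬(y = by_ * 4 + 3 ∧ x = bx * 4 + 3) from by omega)]
        rw [if_neg (show ¬(y = by_ * 4 + 3 ∧ x = bx * 4 + 2) from by omega)]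
        rw [if_neg (show ¬(y = by_ * 4 + 3 ∧ x = bx * 4 + 1) from by omega)]
        rw [if_neg (show ¬(y = by_ * 4 + 3 ∧ x = bx * 4 + 0) from by omega)]
        rw [if_neg (show ¬(y = by_ * 4 + 2 ∧ x = bx * 4 + 3) from by omega)]
        rw [if_neg (show ¬(y = by_ * 4 + 2 ∧ x = bx * 4 + 2) from by omega)]
        rw [if_neg (show ¬(y = by_ * 4 + 2 ∧ x = bx * 4 + 1) from by omega)]
        rw [if_neg (show ¬(y = by_ * 4 + 2 ∧ x = bx * 4 + 0) from by omega)]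
        rw [if_neg (show ¬(y = by_ * 4 + 1 ∧ x = bx * 4 + 3) from by omega)]
        rw [if_neg (show ¬(y = by_ * 4 + 1 ∧ x = bx * 4 + 2) from by omega)]
        rw [if_neg (show ¬(y = by_ * 4 + 1 ∧ x = bx * 4 + 1) from by omega)]
        rw [if_neg (show ¬(y = by_ * 4 + 1 ∧ x = bx * 4 + 0) from by omega)]
        rw [if_neg (show ¬(y = by_ * 4 + 0 ∧ x = bx * 4 + 3) from by omega)]
        rw [if_neg (show ¬(y = by_ * 4 + 0 ∧ x = bx * 4 + 2) from by omega)]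
        rw [if_neg (show ¬(y = by_ * 4 + 0 ∧ x = bx * 4 + 1) from by omega)]
        rw [if_pos (show y = by_ * 4 + 0 ∧ x = bx * 4 + 0 from by omega)]
        try rfl
      · rw [hm, hmx]
        rw [if_neg (show ¬(y = by_ * 4 + 3 ∧ x = bx * 4 + 3) from by omega)]
        rw [if_neg (show ¬(y = by_ * 4 + 3 ∧ x = bx * 4 + 2) from by omega)]
        rw [if_neg (show ¬(y = by_ * 4 + 3 ∧ x = bx * 4 + 1) from by omega)]
        rw [if_neg (show ¬(y = by_ * 4 + 3 ∧ x = bx * 4 + 0) from by omega)]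
        rw [if_neg (show ¬(y = by_ * 4 + 2 ∧ x = bx * 4 + 3) from by omega)]
        rw [if_neg (show ¬(y = by_ * 4 + 2 ∧ x = bx * 4 + 2) from by omega)]
        rw [if_neg (show ¬(y = by_ * 4 + 2 ∧ x = bx * 4 + 1) from by omega)]
        rw [if_neg (show ¬(y = by_ * 4 + 2 ∧ x = bx * 4 + 0) from by omega)]
        rw [if_neg (show ¬(y = by_ * 4 + 1 ∧ x = bx * 4 + 3) from by omega)]
        rw [if_neg (show ¬(y = by_ * 4 + 1 ∧ x = bx * 4 + 2) from by omega)]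
        rw [if_neg (show ¬(y = by_ * 4 + 1 ∧ x = bx * 4 + 1) from by omega)]
        rw [if_neg (show ¬(y = by_ * 4 + 1 ∧ x = bx * 4 + 0) from by omega)]
        rw [if_neg (show ¬(y = by_ * 4 + 0 ∧ x = bx * 4 + 3) from by omega)]
        rw [if_neg (show ¬(y = by_ * 4 + 0 ∧ x = bx * 4 + 2) from by omega)]
        rw [if_pos (show y = by_ * 4 + 0 ∧ x = bx * 4 + 1 from by omega)]
        try rfl
      · rw [hm, hmx]
        rw [if_neg (show ¬(y = by_ * 4 + 3 ∧ x = bx * 4 + 3) from by omega)]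
        rw [if_neg (show ¬(y = by_ * 4 + 3 ∧ x = bx * 4 + 2) from by omega)]
        rw [if_neg (show ¬(y = by_ * 4 + 3 ∧ x = bx * 4 + 1) from by omega)]
        rw [if_neg (show ¬(y = by_ * 4 + 3 ∧ x = bx * 4 + 0) from by omega)]
        rw [if_neg (show ¬(y = by_ * 4 + 2 ∧ x = bx * 4 + 3) from by omega)]
        rw [if_neg (show ¬(y = by_ * 4 + 2 ∧ x = bx * 4 + 2) from by omega)]
        rw [if_neg (show ¬(y = by_ * 4 + 2 ∧ x = bx * 4 + 1) from by omega)]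
        rw [if_neg (show ¬(y = by_ * 4 + 2 ∧ x = bx * 4 + 0) from by omega)]
        rw [if_neg (show ¬(y = by_ * 4 + 1 ∧ x = bx * 4 + 3) from by omega)]
        rw [if_neg (show ¬(y = by_ * 4 + 1 ∧ x = bx * 4 + 2) from by omega)]
        rw [if_neg (show ¬(y = by_ * 4 + 1 ∧ x = bx * 4 + 1) from by omega)]
        rw [if_neg (show ¬(y = by_ * 4 + 1 ∧ x = bx * 4 + 0) from by omega)]
        rw [if_neg (show ¬(y = by_ * 4 + 0 ∧ x = bx * 4 + 3) from by omega)]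
        rw [if_pos (show y = by_ * 4 + 0 ∧ x = bx * 4 + 2 from by omega)]
        try rfl
      · rw [hm, hmx]
        rw [if_neg (show ¬(y = by_ * 4 + 3 ∧ x = bx * 4 + 3) from by omega)]
        rw [if_neg (show ¬(y = by_ * 4 + 3 ∧ x = bx * 4 + 2) from by omega)]
        rw [if_neg (show ¬(y = by_ * 4 + 3 ∧ x = bx * 4 + 1) from by omega)]
        rw [if_neg (show ¬(y = by_ * 4 + 3 ∧ x = bx * 4 + 0) from by omega)]
        rw [if_neg (show ¬(y = by_ * 4 + 2 ∧ x = bx * 4 + 3) from by omega)]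
        rw [if_neg (show ¬(y = by_ * 4 + 2 ∧ x = bx * 4 + 2) from by omega)]
        rw [if_neg (show ¬(y = by_ * 4 + 2 ∧ x = bx * 4 + 1) from by omega)]
        rw [if_neg (show ¬(y = by_ * 4 + 2 ∧ x = bx * 4 + 0) from by omega)]
        rw [if_neg (show ¬(y = by_ * 4 + 1 ∧ x = bx * 4 + 3) from by omega)]
        rw [if_neg (show ¬(y = by_ * 4 + 1 ∧ x = bx * 4 + 2) from by omega)]
        rw [if_neg (show ¬(y = by_ * 4 + 1 ∧ x = bx * 4 + 1) from by omega)]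
        rw [if_neg (show ¬(y = by_ * 4 + 1 ∧ x = bx * 4 + 0) from by omega)]
        rw [if_pos (show y = by_ * 4 + 0 ∧ x = bx * 4 + 3 from by omega)]
        try rfl
      · rw [hm, hmx]
        rw [if_neg (show ¬(y = by_ * 4 + 3 ∧ x = bx * 4 + 3) from by omega)]
        rw [if_neg (show ¬(y = by_ * 4 + 3 ∧ x = bx * 4 + 2) from by omega)]
        rw [if_neg (show ¬(y = by_ * 4 + 3 ∧ x = bx * 4 + 1) from by omega)]
        rw [if_neg (show ¬(y = by_ * 4 + 3 ∧ x = bx * 4 + 0) from by omega)]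
        rw [if_neg (show ¬(y = by_ * 4 + 2 ∧ x = bx * 4 + 3) from by omega)]
        rw [if_neg (show ¬(y = by_ * 4 + 2 ∧ x = bx * 4 + 2) from by omega)]
        rw [if_neg (show ¬(y = by_ * 4 + 2 ∧ x = bx * 4 + 1) from by omega)]
        rw [if_neg (show ¬(y = by_ * 4 + 2 ∧ x = bx * 4 + 0) from by omega)]
        rw [if_neg (show ¬(y = by_ * 4 + 1 ∧ x = bx * 4 + 3) from by omega)]
        rw [if_neg (show ¬(y = by_ * 4 + 1 ∧ x = bx * 4 + 2) from by omega)]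
        rw [if_neg (show ¬(y = by_ * 4 + 1 ∧ x = bx * 4 + 1) from by omega)]
        rw [if_pos (show y = by_ * 4 + 1 ∧ x = bx * 4 + 0 from by omega)]
        try rfl
      · rw [hm, hmx]
        rw [if_neg (show ¬(y = by_ * 4 + 3 ∧ x = bx * 4 + 3) from by omega)]
        rw [if_neg (show ¬(y = by_ * 4 + 3 ∧ x = bx * 4 + 2) from by omega)]
        rw [if_neg (show ¬(y = by_ * 4 + 3 ∧ x = bx * 4 + 1) from by omega)]
        rw [if_neg (show ¬(y = by_ * 4 + 3 ∧ x = bx * 4 + 0) from by omega)]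
        rw [if_neg (show ¬(y = by_ * 4 + 2 ∧ x = bx * 4 + 3) from by omega)]
        rw [if_neg (show ¬(y = by_ * 4 + 2 ∧ x = bx * 4 + 2) from by omega)]
        rw [if_neg (show ¬(y = by_ * 4 + 2 ∧ x = bx * 4 + 1) from by omega)]
        rw [if_neg (show ¬(y = by_ * 4 + 2 ∧ x = bx * 4 + 0) from by omega)]
        rw [if_neg (show ¬(y = by_ * 4 + 1 ∧ x = bx * 4 + 3) from by omega)]
        rw [if_neg (show ¬(y = by_ * 4 + 1 ∧ x = bx * 4 + 2) from by omega)]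
        rw [if_pos (show y = by_ * 4 + 1 ∧ x = bx * 4 + 1 from by omega)]
        try rfl
      · rw [hm, hmx]
        rw [if_neg (show ¬(y = by_ * 4 + 3 ∧ x = bx * 4 + 3) from by omega)]
        rw [if_neg (show ¬(y = by_ * 4 + 3 ∧ x = bx * 4 + 2) from by omega)]
        rw [if_neg (show ¬(y = by_ * 4 + 3 ∧ x = bx * 4 + 1) from by omega)]
        rw [if_neg (show ¬(y = by_ * 4 + 3 ∧ x = bx * 4 + 0) from by omega)]
        rw [if_neg (show ¬(y = by_ * 4 + 2 ∧ x = bx * 4 + 3) from by omega)]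
        rw [if_neg (show ¬(y = by_ * 4 + 2 ∧ x = bx * 4 + 2) from by omega)]
        rw [if_neg (show ¬(y = by_ * 4 + 2 ∧ x = bx * 4 + 1) from by omega)]
        rw [if_neg (show ¬(y = by_ * 4 + 2 ∧ x = bx * 4 + 0) from by omega)]
        rw [if_neg (show ¬(y = by_ * 4 + 1 ∧ x = bx * 4 + 3) from by omega)]
        rw [if_pos (show y = by_ * 4 + 1 ∧ x = bx * 4 + 2 from by omega)]
        try rfl
      · rw [hm, hmx]
        rw [if_neg (show ¬(y = by_ * 4 + 3 ∧ x = bx * 4 + 3) from by omega)]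
        rw [if_neg (show ¬(y = by_ * 4 + 3 ∧ x = bx * 4 + 2) from by omega)]
        rw [if_neg (show ¬(y = by_ * 4 + 3 ∧ x = bx * 4 + 1) from by omega)]
        rw [if_neg (show ¬(y = by_ * 4 + 3 ∧ x = bx * 4 + 0) from by omega)]
        rw [if_neg (show ¬(y = by_ * 4 + 2 ∧ x = bx * 4 + 3) from by omega)]
        rw [if_neg (show ¬(y = by_ * 4 + 2 ∧ x = bx * 4 + 2) from by omega)]
        rw [if_neg (show ¬(y = by_ * 4 + 2 ∧ x = bx * 4 + 1) from by omega)]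
        rw [if_neg (show ¬(y = by_ * 4 + 2 ∧ x = bx * 4 + 0) from by omega)]
        rw [if_pos (show y = by_ * 4 + 1 ∧ x = bx * 4 + 3 from by omega)]
        try rfl
      · rw [hm, hmx]
        rw [if_neg (show ¬(y = by_ * 4 + 3 ∧ x = bx * 4 + 3) from by omega)]
        rw [if_neg (show ¬(y = by_ * 4 + 3 ∧ x = bx * 4 + 2) from by omega)]
        rw [if_neg (show ¬(y = by_ * 4 + 3 ∧ x = bx * 4 + 1) from by omega)]
        rw [if_neg (show ¬(y = by_ * 4 + 3 ∧ x = bx * 4 + 0) from by omega)]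
        rw [if_neg (show ¬(y = by_ * 4 + 2 ∧ x = bx * 4 + 3) from by omega)]
        rw [if_neg (show ¬(y = by_ * 4 + 2 ∧ x = bx * 4 + 2) from by omega)]
        rw [if_neg (show ¬(y = by_ * 4 + 2 ∧ x = bx * 4 + 1) from by omega)]
        rw [if_pos (show y = by_ * 4 + 2 ∧ x = bx * 4 + 0 from by omega)]
        try rfl
      · rw [hm, hmx]
        rw [if_neg (show ¬(y = by_ * 4 + 3 ∧ x = bx * 4 + 3) from by omega)]
        rw [if_neg (show ¬(y = by_ * 4 + 3 ∧ x = bx * 4 + 2) from by omega)]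
        rw [if_neg (show ¬(y = by_ * 4 + 3 ∧ x = bx * 4 + 1) from by omega)]
        rw [if_neg (show ¬(y = by_ * 4 + 3 ∧ x = bx * 4 + 0) from by omega)]
        rw [if_neg (show ¬(y = by_ * 4 + 2 ∧ x = bx * 4 + 3) from by omega)]
        rw [if_neg (show ¬(y = by_ * 4 + 2 ∧ x = bx * 4 + 2) from by omega)]
        rw [if_pos (show y = by_ * 4 + 2 ∧ x = bx * 4 + 1 from by omega)]
        try rfl
      · rw [hm, hmx]
        rw [if_neg (show ¬(y = by_ * 4 + 3 ∧ x = bx * 4 + 3) from by omega)]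
        rw [if_neg (show ¬(y = by_ * 4 + 3 ∧ x = bx * 4 + 2) from by omega)]
        rw [if_neg (show ¬(y = by_ * 4 + 3 ∧ x = bx * 4 + 1) from by omega)]
        rw [if_neg (show ¬(y = by_ * 4 + 3 ∧ x = bx * 4 + 0) from by omega)]
        rw [if_neg (show ¬(y = by_ * 4 + 2 ∧ x = bx * 4 + 3) from by omega)]
        rw [if_pos (show y = by_ * 4 + 2 ∧ x = bx * 4 + 2 from by omega)]
        try rfl
      · rw [hm, hmx]
        rw [if_neg (show ¬(y = by_ * 4 + 3 ∧ x = bx * 4 + 3) from by omega)]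
        rw [if_neg (show ¬(y = by_ * 4 + 3 ∧ x = bx * 4 + 2) from by omega)]
        rw [if_neg (show ¬(y = by_ * 4 + 3 ∧ x = bx * 4 + 1) from by omega)]
        rw [if_neg (show ¬(y = by_ * 4 + 3 ∧ x = bx * 4 + 0) from by omega)]
        rw [if_pos (show y = by_ * 4 + 2 ∧ x = bx * 4 + 3 from by omega)]
        try rfl
      · rw [hm, hmx]
        rw [if_neg (show ¬(y = by_ * 4 + 3 ∧ x = bx * 4 + 3) from by omega)]
        rw [if_neg (show ¬(y = by_ * 4 + 3 ∧ x = bx * 4 + 2) from by omega)]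
        rw [if_neg (show ¬(y = by_ * 4 + 3 ∧ x = bx * 4 + 1) from by omega)]
        rw [if_pos (show y = by_ * 4 + 3 ∧ x = bx * 4 + 0 from by omega)]
        try rfl
      · rw [hm, hmx]
        rw [if_neg (show ¬(y = by_ * 4 + 3 ∧ x = bx * 4 + 3) from by omega)]
        rw [if_neg (show ¬(y = by_ * 4 + 3 ∧ x = bx * 4 + 2) from by omega)]
        rw [if_pos (show y = by_ * 4 + 3 ∧ x = bx * 4 + 1 from by omega)]
        try rfl
      · rw [hm, hmx]
        rw [if_neg (show ¬(y = by_ * 4 + 3 ∧ x = bx * 4 + 3) from by omega)]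
        rw [if_pos (show y = by_ * 4 + 3 ∧ x = bx * 4 + 2 from by omega)]
        try rfl
      · rw [hm, hmx]
        rw [if_pos (show y = by_ * 4 + 3 ∧ x = bx * 4 + 3 from by omega)]
        try rfl
    · have hn : ∀ t u : Nat, u < 4 → ¬(y = by_ * 4 + t ∧ x = bx * 4 + u) := by
        intro t u hu hc; exact hx (by omega)
      simp only [if_neg (hn 0 0 (by omega)), if_neg (hn 0 1 (by omega)),
        if_neg (hn 0 2 (by omega)), if_neg (hn 0 3 (by omega)),
        if_neg (hn 1 0 (by omega)), if_neg (hn 1 1 (by omega)),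
        if_neg (hn 1 2 (by omega)), if_neg (hn 1 3 (by omega)),
        if_neg (hn 2 0 (by omega)), if_neg (hn 2 1 (by omega)),
        if_neg (hn 2 2 (by omega)), if_neg (hn 2 3 (by omega)),
        if_neg (hn 3 0 (by omega)), if_neg (hn 3 1 (by omega)),
        if_neg (hn 3 2 (by omega)), if_neg (hn 3 3 (by omega))]
      rw [if_neg (fun hc => hx hc.2)]
  · have hn : ∀ t u : Nat, t < 4 → ¬(y = by_ * 4 + t ∧ x = bx * 4 + u) := by
      intro t u ht hc; exact hy (by omega)
    simp only [if_neg (hn 0 0 (by omega)), if_neg (hn 0 1 (by omega)),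
      if_neg (hn 0 2 (by omega)), if_neg (hn 0 3 (by omega)),
      if_neg (hn 1 0 (by omega)), if_neg (hn 1 1 (by omega)),
      if_neg (hn 1 2 (by omega)), if_neg (hn 1 3 (by omega)),
      if_neg (hn 2 0 (by omega)), if_neg (hn 2 1 (by omega)),
      if_neg (hn 2 2 (by omega)), if_neg (hn 2 3 (by omega)),
      if_neg (hn 3 0 (by omega)), if_neg (hn 3 1 (by omega)),
      if_neg (hn 3 2 (by omega)), if_neg (hn 3 3 (by omega))]
    rw [if_neg (fun hc => hy hc.1)]

theorem pv_cols (blocks : List (List (List Int))) (mb : List (List Int)) (wt : List Int)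
    (n w : Nat) (by_ : Nat) (l : List Nat) (g : Nat → Nat → Bool) :
    l.foldl (fun m bx =>
      if (blocks.length : Int) ≤ (mb.getD by_ []).getD bx 0 then m
      else
        (List.range 4).foldl (fun m ty =>
          (List.range 4).foldl (fun m tx =>
            m.modify (by_ * 4 + ty)
              (fun row => row.set (bx * 4 + tx)
                (wt.contains ((((PySem.List.pyGet? blocks ((mb.getD by_ []).getD bx 0)).getD []).getD ty []).getD tx 0)))) m) m)
      (pvM n w g)
    = pvM n w (fun y x =>
        if y / 4 = by_ ∧ x / 4 ∈ l ∧ ¬ (blocks.length : Int) ≤ (mb.getD by_ []).getD (x / 4) 0 then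
          pvTile wt ((PySem.List.pyGet? blocks ((mb.getD by_ []).getD (x / 4) 0)).getD []) (y % 4) (x % 4)
        else g y x) := by
  induction l generalizing g with
  | nil => simp
  | cons bx l ih =>
    simp only [List.foldl_cons]
    by_cases h : (blocks.length : Int) ≤ (mb.getD by_ []).getD bx 0
    · rw [if_pos h, ih]
      apply pvM_congr
      intro y _ x _
      by_cases hb : x / 4 = bx
      · simp [List.mem_cons, hb, not_lt.mpr h, -List.getD_eq_getElem?_getD]
      · simp [List.mem_cons, hb]
    · rw [if_neg h, pv_block, ih]
      apply pvM_congr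
      intro y _ x _
      by_cases hyy : y / 4 = by_
      · by_cases hb : x / 4 = bx
        · simp [List.mem_cons, hyy, hb, not_le.mp h, pvTile, -List.getD_eq_getElem?_getD]
        · simp [List.mem_cons, hyy, hb]
      · simp [List.mem_cons, hyy]

theorem pv_rows (blocks : List (List (List Int))) (mb : List (List Int)) (wt : List Int)
    (n w : Nat) (wcols : Nat) (l : List Nat) (g : Nat → Nat → Bool) :
    l.foldl (fun m by_ =>
      (List.range wcols).foldl (fun m bx =>
        if (blocks.length : Int) ≤ (mb.getD by_ []).getD bx 0 then m
        else
          (List.range 4).foldl (fun m ty =>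
            (List.range 4).foldl (fun m tx =>
              m.modify (by_ * 4 + ty)
                (fun row => row.set (bx * 4 + tx)
                  (wt.contains ((((PySem.List.pyGet? blocks ((mb.getD by_ []).getD bx 0)).getD []).getD ty []).getD tx 0)))) m) m) m)
      (pvM n w g)
    = pvM n w (fun y x =>
        if y / 4 ∈ l ∧ x / 4 < wcols ∧ ¬ (blocks.length : Int) ≤ (mb.getD (y / 4) []).getD (x / 4) 0 then
          pvTile wt ((PySem.List.pyGet? blocks ((mb.getD (y / 4) []).getD (x / 4) 0)).getD []) (y % 4) (x % 4)
        else g y x) := by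
  induction l generalizing g with
  | nil => simp
  | cons b l ih =>
    simp only [List.foldl_cons]
    rw [pv_cols, ih]
    apply pvM_congr
    intro y _ x _
    by_cases hyb : y / 4 = b
    · by_cases hB1 : x / 4 < wcols
      · by_cases hB2 : (blocks.length : Int) ≤ (mb.getD b []).getD (x / 4) 0
        · simp [List.mem_cons, List.mem_range, hyb, hB1, not_lt.mpr hB2, -List.getD_eq_getElem?_getD]
        · simp [List.mem_cons, List.mem_range, hyb, hB1, not_le.mp hB2, -List.getD_eq_getElem?_getD]
      · simp [List.mem_cons, List.mem_range, hyb, hB1]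
    · simp [List.mem_cons, hyb]

theorem pv_main (blocks : List (List (List Int))) (mb : List (List Int)) (wt : List Int) :
    generate_walkability_tile_matrix blocks mb wt = generate_walkability_tile_matrix_alt blocks mb wt := by
  have hB : generate_walkability_tile_matrix_alt blocks mb wt
      = pvM (mb.length * 4) ((mb.headD []).length * 4) (fun gy gx =>
          if (mb.getD (gy / 4) []).getD (gx / 4) 0 < (blocks.length : Int) then
            (PySem.Set.ofList wt).contains ((((PySem.List.pyGet? blocks ((mb.getD (gy / 4) []).getD (gx / 4) 0)).getD []).getD (gy % 4) []).getD (gx % 4) 0)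
          else false) := rfl
  rw [hB]
  show (List.range mb.length).foldl _ (List.replicate (mb.length * 4) (List.replicate ((mb.headD []).length * 4) false)) = _
  rw [pv_init, pv_rows]
  apply pvM_congr
  intro y hy x hx
  have h1 : y / 4 ∈ List.range mb.length := List.mem_range.mpr (by omega)
  have h2 : x / 4 < (mb.headD []).length := by omega
  by_cases hidx : (blocks.length : Int) ≤ (mb.getD (y / 4) []).getD (x / 4) 0
  · simp [h1, h2, not_lt.mpr hidx, -List.getD_eq_getElem?_getD, -List.headD_eq_head?_getD]
  · simp [h1, h2, not_le.mp hidx, pvTile, -List.getD_eq_getElem?_getD, -List.headD_eq_head?_getD]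

-- ===== VERDICT (by name: the statement is the Claim_ definition above) =====
theorem generate_walkability_tile_matrix_spec : Claim_equal_generate_walkability_tile_matrix := by
  intro blocks map_blocks walkable_tiles _ _
  exact pv_main blocks map_blocks walkable_tiles
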